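-- pv_equiv track=rewrite | github.com/future-item/ILP-CoT | prolog.py | post_rules_process
-- ===== SOURCE A (Python) =====
-- def post_rules_process(rules_str: str) -> set:
--     if not rules_str:
--         return set()
--
--     normalized_rules = set()
--     for line in rules_str.strip().splitlines():
--         if ':-' in line:
--             conditions_part = line.split(':-')[1].rstrip('.').split(',')
--             conditions_tuple = tuple(sorted(set(p.strip() for p in conditions_part)))
--             if conditions_tuple:
--                 normalized_rules.add(conditions_tuple)
--
--     final_rules = set()
--     for rule_a in normalized_rules:
--         is_subsumed = False
--         for rule_b in normalized_rules:
--             if rule_a != rule_b and set(rule_a).issubset(set(rule_b)):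
--                 is_subsumed = True
--                 break
--         if not is_subsumed:
--             final_rules.add(rule_a)
--
--     return final_rules
-- ===== SOURCE B (Python) =====
-- def post_rules_process(rules_str: str) -> set:
--     if not rules_str:
--         return set()
--
--     # parse: ordered, deduplicated list of normalized condition tuples
--     rules = []
--     for line in rules_str.strip().splitlines():
--         if ':-' in line:
--             body = line.split(':-')[1].rstrip('.')
--             t = tuple(sorted({p.strip() for p in body.split(',')}))
--             if t not in rules:
--                 rules.append(t)
--
--     # inverted index: condition -> rules that contain it
--     index = {}
--     for t in rules:
--         for c in t:
--             index.setdefault(c, []).append(t)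
--
--     # a rule is maximal iff the only rule containing all its conditions is itself
--     result = set()
--     for t in rules:
--         supers = set(index[t[0]])
--         for c in t:
--             supers &= set(index[c])
--         if len(supers) == 1:
--             result.add(t)
--     return result
-- ===== Notes on version B (the rewrite author's own statement) =====
-- stated objective: faster
-- what changed: A's quadratic all-pairs subsumption scan (each rule's condition set tested against every other rule) is replaced by an inverted index from condition to the rules containing it: a rule is kept iff the intersection of its conditions' posting lists is the singleton {itself}.
import Mathlib
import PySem

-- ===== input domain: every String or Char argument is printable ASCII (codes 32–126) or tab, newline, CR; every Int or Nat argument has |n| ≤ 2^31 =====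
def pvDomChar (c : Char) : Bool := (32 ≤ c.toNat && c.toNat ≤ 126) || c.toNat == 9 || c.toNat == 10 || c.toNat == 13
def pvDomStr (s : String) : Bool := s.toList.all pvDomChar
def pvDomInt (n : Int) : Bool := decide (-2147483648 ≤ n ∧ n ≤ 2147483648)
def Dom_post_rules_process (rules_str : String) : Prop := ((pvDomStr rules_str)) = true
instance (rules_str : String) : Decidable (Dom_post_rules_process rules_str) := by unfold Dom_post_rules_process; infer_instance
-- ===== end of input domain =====

-- B replaces A's quadratic all-pairs subsumption scan by an inverted index (condition -> rules
-- containing it): a rule is kept iff the intersection of its conditions' posting lists is a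
-- singleton (itself). Same parsing; the returned set is identical.

-- ===== PORT A =====
-- exact port of Python's s.rstrip('.'): drop trailing '.' characters
def rstripDot (s : String) : String :=
  String.ofList ((s.toList.reverse.dropWhile (fun c => c == '.')).reverse)

def post_rules_process (rules_str : String) : List (List String) :=
  if rules_str == "" then []
  else
    let normalized_rules : PySem.Set (List String) :=
      (PySem.Str.splitlines (PySem.Str.strip rules_str)).foldl (fun acc line =>
        if PySem.Str.isIn ":-" line then
          -- line.split(':-')[1].rstrip('.').split(','): ':-' is a non-empty separator occurring
          -- in line, so split? is some with ≥ 2 pieces; both getD defaults are unreachable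
          let conditions_part : List String :=
            (PySem.Str.split? (rstripDot ((PySem.List.pyGet? ((PySem.Str.split? line ":-").getD []) 1).getD "")) ",").getD []
          let conditions_tuple : List String :=
            PySem.List.sorted (PySem.Set.ofList (conditions_part.map PySem.Str.strip)) (fun x => x) false
          if conditions_tuple ≠ [] then PySem.Set.add acc conditions_tuple else acc
        else acc) PySem.Set.empty
    normalized_rules.foldl (fun final_rules rule_a =>
      let is_subsumed :=
        normalized_rules.any (fun rule_b =>
          rule_a != rule_b && PySem.Set.issubset (PySem.Set.ofList rule_a) (PySem.Set.ofList rule_b))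
      if is_subsumed then final_rules else PySem.Set.add final_rules rule_a) PySem.Set.empty

-- ===== PORT B =====
def post_rules_process_alt (rules_str : String) : List (List String) :=
  if rules_str == "" then []
  else
    let rules : List (List String) :=
      (PySem.Str.splitlines (PySem.Str.strip rules_str)).foldl (fun acc line =>
        if PySem.Str.isIn ":-" line then
          -- ':-' occurs in line, so split? is some with ≥ 2 pieces; the getD defaults are unreachable
          let body : String :=
            rstripDot ((PySem.List.pyGet? ((PySem.Str.split? line ":-").getD []) 1).getD "")
          let t : List String :=
            PySem.List.sorted (PySem.Set.ofList (((PySem.Str.split? body ",").getD []).map PySem.Str.strip)) (fun x => x) false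
          if acc.contains t then acc else acc ++ [t]
        else acc) []
    -- inverted index: condition -> list of rules containing it (index.setdefault(c, []).append(t))
    let index : PySem.Dict String (List (List String)) :=
      rules.foldl (fun d t => t.foldl (fun d c => d.modify c [] (fun l => l ++ [t])) d) PySem.Dict.empty
    rules.foldl (fun res t =>
      -- index[t[0]] and index[c]: every condition of t is a key of index (t itself was indexed),
      -- and t is non-empty, so the getD defaults are unreachable
      let supers : PySem.Set (List String) :=
        t.foldl (fun s c => PySem.Set.inter s (PySem.Set.ofList (index.getD c [])))
          (PySem.Set.ofList (index.getD ((PySem.List.pyGet? t 0).getD "") []))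
      if PySem.Set.len supers == 1 then PySem.Set.add res t else res) PySem.Set.empty

-- ===== PRECONDITION & SPEC =====
def Spec_post_rules_process (rules_str : String) (out : List (List String)) : Prop := out = post_rules_process_alt rules_str
instance (rules_str : String) (out : List (List String)) : Decidable (Spec_post_rules_process rules_str out) := by unfold Spec_post_rules_process; infer_instance

-- ===== CLAIM (what is proved, stated in full; the proofs are below) =====
def Claim_equal_post_rules_process : Prop := ∀ (rules_str : String), Dom_post_rules_process rules_str → Spec_post_rules_process rules_str (post_rules_process rules_str)

-- ===== LEMMAS AND PROOFS =====

-- the normalized condition tuple built from one line body: non-empty and duplicate-free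
theorem pv_go_length (sep : List Char) : ∀ (fuel : Nat) (l cur : List Char) (acc : List (List Char)),
    acc.length < (PySem.Chars.splitOn.go sep fuel l cur acc).length := by
  intro fuel
  induction fuel with
  | zero => intro l cur acc; rw [PySem.Chars.splitOn.go.eq_def]; simp
  | succ fuel ih =>
    intro l cur acc
    rw [PySem.Chars.splitOn.go.eq_def]
    cases l with
    | nil => simp
    | cons c rest =>
      by_cases hp : sep.isPrefixOf (c :: rest) = true
      · simp only [hp, if_true]
        calc acc.length < (cur.reverse :: acc).length := by simp
          _ < _ := ih _ _ _
      · simp only [hp]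
        simpa using ih rest (c :: cur) acc

theorem pv_split_comma_ne_nil (s : String) : (PySem.Str.split? s ",").getD [] ≠ [] := by
  have h1 : PySem.Str.split? s "," =
      some ((PySem.Chars.splitOn s.toList ",".toList).map String.ofList) := by
    simp [PySem.Str.split?, PySem.Chars.split?]
  rw [h1]
  simp only [Option.getD_some, ne_eq, List.map_eq_nil_iff]
  intro hc
  have := pv_go_length ",".toList (s.toList.length + 1) s.toList [] []
  rw [show PySem.Chars.splitOn s.toList ",".toList
        = PySem.Chars.splitOn.go ",".toList (s.toList.length + 1) s.toList [] [] from rfl] at hc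
  rw [hc] at this
  simp at this

theorem pv_tuple_nonempty (parts : List String) (hp : parts ≠ []) :
    PySem.List.sorted (PySem.Set.ofList (parts.map PySem.Str.strip)) (fun x => x) false ≠ [] := by
  rw [ne_eq, PySem.List.sorted_eq_nil_iff]
  intro hc
  obtain ⟨a, t, rfl⟩ := List.exists_cons_of_ne_nil hp
  have : PySem.Str.strip a ∈ PySem.Set.ofList ((a :: t).map PySem.Str.strip) :=
    (PySem.Set.mem_ofList _ _).mpr (by simp)
  rw [hc] at this
  simp at this

theorem pv_tuple_nodup (parts : List String) :
    (PySem.List.sorted (PySem.Set.ofList (parts.map PySem.Str.strip)) (fun x => x) false).Nodup := by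
  have h := (PySem.List.sorted_perm (PySem.Set.ofList (parts.map PySem.Str.strip)) (fun x : String => x) false).nodup_iff
  exact h.mpr (PySem.Set.nodup_ofList _)

theorem pv_scontains_eq_false_iff (s : PySem.Set (List String)) (x : List String) :
    s.contains x = false ↔ x ∉ s := by
  rw [Bool.eq_false_iff, ne_eq, PySem.Set.contains_iff]

-- generic: a fold that only ever adds set-elements keeps the accumulator duplicate-free
theorem pv_nodup_foldl {β : Type} (l : List β)
    (g : PySem.Set (List String) → β → PySem.Set (List String))
    (hg : ∀ acc x, g acc x = acc ∨ ∃ y, g acc x = PySem.Set.add acc y) :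
    ∀ acc : PySem.Set (List String), acc.Nodup → (l.foldl g acc).Nodup := by
  induction l with
  | nil => intro acc h; simpa using h
  | cons x l ih =>
    intro acc h
    simp only [List.foldl_cons]
    apply ih
    rcases hg acc x with he | ⟨y, he⟩
    · rw [he]; exact h
    · rw [he]; exact PySem.Set.nodup_add acc y h

theorem pv_mem_foldl {β : Type} (l : List β) (Q : List String → Prop)
    (g : PySem.Set (List String) → β → PySem.Set (List String))
    (hg : ∀ acc x y, y ∈ g acc x → y ∈ acc ∨ Q y) :
    ∀ acc, (∀ y ∈ acc, Q y) → ∀ y ∈ l.foldl g acc, Q y := by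
  induction l with
  | nil => intro acc h; simpa using h
  | cons x l ih =>
    intro acc h
    simp only [List.foldl_cons]
    apply ih
    intro y hy
    rcases hg acc x y hy with h' | h'
    · exact h y h'
    · exact h'

-- a guarded set-add fold from a fresh accumulator is a filter
theorem pv_foldl_add_filter (l : List (List String)) (p : List String → Bool) :
    ∀ acc : PySem.Set (List String), (∀ x ∈ l, acc.contains x = false) → l.Nodup →
      l.foldl (fun a x => if p x then PySem.Set.add a x else a) acc = acc ++ l.filter p := by
  induction l with
  | nil => intro acc _ _; simp
  | cons x l ih =>
    intro acc hfresh hnd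
    simp only [List.foldl_cons, List.filter_cons]
    have hx : acc.contains x = false := hfresh x (by simp)
    have hxm : x ∉ acc := (pv_scontains_eq_false_iff acc x).mp hx
    have hadd : PySem.Set.add acc x = acc ++ [x] := by
      simp [PySem.Set.add, hxm]
    by_cases hp : p x = true
    · rw [if_pos hp, if_pos hp, hadd]
      rw [ih (acc ++ [x]) ?_ hnd.of_cons]
      · simp
      · intro y hy
        rw [pv_scontains_eq_false_iff]
        simp only [List.mem_append, List.mem_singleton]
        rintro (hya | rfl)
        · exact (pv_scontains_eq_false_iff acc y).mp (hfresh y (by simp [hy])) hya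
        · exact (List.nodup_cons.mp hnd).1 hy
    · rw [if_neg hp, if_neg hp]
      exact ih acc (fun y hy => hfresh y (by simp [hy])) hnd.of_cons

theorem pv_filter_map_pair (t : List String) (T : List String) (c : String) (h : t.Nodup) :
    ((t.map (fun c' => (c', T))).filter (fun p => p.1 == c)).map (fun p => p.2)
      = if t.contains c then [T] else [] := by
  induction t with
  | nil => simp
  | cons a t ih =>
    simp only [List.map_cons, List.filter_cons, List.contains_cons]
    by_cases hac : a = c
    · subst hac
      have hnot : a ∉ t := (List.nodup_cons.mp h).1
      have hfe : (t.map (fun c' => (c', T))).filter (fun p => p.1 == a) = [] := by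
        rw [List.filter_eq_nil_iff]
        intro p hm
        simp only [List.mem_map] at hm
        obtain ⟨c'', hc'', rfl⟩ := hm
        simp only [beq_iff_eq]
        rintro rfl
        exact hnot hc''
      simp [hfe]
    · have hthis : (a == c) = false := beq_eq_false_iff_ne.mpr hac
      have hca : (c == a) = false := beq_eq_false_iff_ne.mpr (fun h' => hac h'.symm)
      simp [hthis, hca, ih (List.nodup_cons.mp h).2]

-- the inverted index: the posting list of c is the rules that contain c, in order
theorem pv_index_getD (c : String) : ∀ (N : List (List String)), (∀ t ∈ N, t.Nodup) →
    ∀ d : PySem.Dict String (List (List String)),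
      (N.foldl (fun d t => t.foldl (fun d c => d.modify c [] (fun l => l ++ [t])) d) d).getD c []
        = d.getD c [] ++ N.filter (fun t => t.contains c) := by
  intro N
  induction N with
  | nil => intro _ d; simp
  | cons t N ih =>
    intro hN d
    simp only [List.foldl_cons, List.filter_cons]
    rw [ih (fun u hu => hN u (by simp [hu]))]
    have hinner : (t.foldl (fun d c => d.modify c [] (fun l => l ++ [t])) d).getD c []
        = d.getD c [] ++ (if t.contains c then [t] else []) := by
      have hm : t.foldl (fun d c => d.modify c [] (fun l => l ++ [t])) d
          = (t.map (fun c' => (c', t))).foldl (fun d p => d.modify p.1 [] (fun l => l ++ [p.2])) d := by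
        rw [List.foldl_map]
      rw [hm, PySem.Dict.getD_foldl_modify_append,
          pv_filter_map_pair t t c (hN t (by simp))]
    rw [hinner]
    by_cases hmem : c ∈ t
    · simp [hmem]
    · simp [hmem]

-- folding intersections of posting lists is a filter by "contains every condition"
theorem pv_inter_fold (cs : List String) (f : String → List (List String)) :
    ∀ s : PySem.Set (List String),
      cs.foldl (fun s c => PySem.Set.inter s (PySem.Set.ofList (f c))) s
        = s.filter (fun x => cs.all (fun c => (f c).contains x)) := by
  induction cs with
  | nil => intro s; simp
  | cons c cs ih =>
    intro s
    simp only [List.foldl_cons]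
    rw [ih]
    simp only [PySem.Set.inter, List.filter_filter]
    apply List.filter_congr
    intro x _
    simp [List.all_cons, Bool.and_comm]

-- a duplicate-free list whose filter contains t has filter-length 1 iff t is the only hit
theorem pv_filter_length_one (N : List (List String)) (hN : N.Nodup) (t : List String)
    (ht : t ∈ N) (p : List String → Bool) (hpt : p t = true) :
    ((N.filter p).length = 1) ↔ (∀ s ∈ N, p s = true → s = t) := by
  have htf : t ∈ N.filter p := List.mem_filter.mpr ⟨ht, hpt⟩
  constructor
  · intro h s hs hps
    obtain ⟨a, ha⟩ := List.length_eq_one_iff.mp h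
    have h1 : t = a := by have := htf; rw [ha] at this; simpa using this
    have h2 : s = a := by
      have : s ∈ N.filter p := List.mem_filter.mpr ⟨hs, hps⟩
      rw [ha] at this; simpa using this
    rw [h2, h1]
  · intro h
    have hall : ∀ s ∈ N.filter p, s = t := fun s hs =>
      h s (List.mem_filter.mp hs).1 (List.mem_filter.mp hs).2
    have hnd : (N.filter p).Nodup := hN.filter p
    rcases hf : N.filter p with _ | ⟨a, _ | ⟨b, l⟩⟩
    · rw [hf] at htf; simp at htf
    · simp
    · exfalso
      rw [hf] at hall hnd
      have ha : a = t := hall a (by simp)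
      have hb : b = t := hall b (by simp)
      rw [List.nodup_cons] at hnd
      exact hnd.1 (by rw [ha, hb]; simp)

-- proof-side zeta-free names for the two ports' phases (definitionally equal to the ports' bodies)
def pvTuple (line : String) : List String :=
  PySem.List.sorted (PySem.Set.ofList ((((PySem.Str.split? (rstripDot ((PySem.List.pyGet? ((PySem.Str.split? line ":-").getD []) 1).getD "")) ",").getD []).map PySem.Str.strip))) (fun x => x) false

def pvParse (L : List String) : PySem.Set (List String) :=
  L.foldl (fun acc line =>
    if PySem.Str.isIn ":-" line then
      (if pvTuple line ≠ [] then PySem.Set.add acc (pvTuple line) else acc)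
    else acc) PySem.Set.empty

def pvParseB (L : List String) : List (List String) :=
  L.foldl (fun acc line =>
    if PySem.Str.isIn ":-" line then
      (if acc.contains (pvTuple line) then acc else acc ++ [pvTuple line])
    else acc) []

def pvSub (N : List (List String)) (t : List String) : Bool :=
  N.any (fun s => t != s && PySem.Set.issubset (PySem.Set.ofList t) (PySem.Set.ofList s))

def pvFinalA (N : List (List String)) : PySem.Set (List String) :=
  N.foldl (fun acc t => if pvSub N t then acc else PySem.Set.add acc t) PySem.Set.empty

def pvIndex (N : List (List String)) : PySem.Dict String (List (List String)) :=
  N.foldl (fun d t => t.foldl (fun d c => d.modify c [] (fun l => l ++ [t])) d) PySem.Dict.empty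

def pvSupers (N : List (List String)) (t : List String) : PySem.Set (List String) :=
  t.foldl (fun s c => PySem.Set.inter s (PySem.Set.ofList ((pvIndex N).getD c [])))
    (PySem.Set.ofList ((pvIndex N).getD ((PySem.List.pyGet? t 0).getD "") []))

def pvFinalB (N : List (List String)) : PySem.Set (List String) :=
  N.foldl (fun res t => if PySem.Set.len (pvSupers N t) == 1 then PySem.Set.add res t else res) PySem.Set.empty

theorem pv_tuple_ne_nil (line : String) : pvTuple line ≠ [] :=
  pv_tuple_nonempty _ (pv_split_comma_ne_nil _)

theorem pv_tuple_nodup' (line : String) : (pvTuple line).Nodup :=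
  pv_tuple_nodup _

theorem pv_parse_eq (L : List String) : pvParse L = pvParseB L := by
  unfold pvParse pvParseB
  have hstep : (fun (acc : PySem.Set (List String)) (line : String) =>
      if PySem.Str.isIn ":-" line then
        (if pvTuple line ≠ [] then PySem.Set.add acc (pvTuple line) else acc)
      else acc)
      = (fun (acc : PySem.Set (List String)) (line : String) =>
      if PySem.Str.isIn ":-" line then
        (if acc.contains (pvTuple line) then acc else acc ++ [pvTuple line])
      else acc) := by
    funext acc line
    by_cases hin : PySem.Str.isIn ":-" line = true
    · rw [if_pos hin, if_pos hin, if_pos (pv_tuple_ne_nil line)]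
      rfl
    · rw [if_neg hin, if_neg hin]
  rw [hstep]
  rfl

theorem pv_parse_nodup (L : List String) : (pvParse L).Nodup := by
  unfold pvParse
  apply pv_nodup_foldl _ _ ?_ _ (by simp [PySem.Set.empty])
  intro acc x
  by_cases hin : PySem.Str.isIn ":-" x = true
  · by_cases hne : pvTuple x ≠ []
    · exact Or.inr ⟨pvTuple x, by rw [if_pos hin, if_pos hne]⟩
    · exact Or.inl (by rw [if_pos hin, if_neg hne])
  · exact Or.inl (by rw [if_neg hin])

theorem pv_parse_mem (L : List String) : ∀ t ∈ pvParse L, t.Nodup ∧ t ≠ [] := by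
  unfold pvParse
  refine pv_mem_foldl L (fun y => y.Nodup ∧ y ≠ []) _ ?_ PySem.Set.empty
    (by simp [PySem.Set.empty])
  intro acc x y hy
  by_cases hin : PySem.Str.isIn ":-" x = true
  · rw [if_pos hin] at hy
    by_cases hne : pvTuple x ≠ []
    · rw [if_pos hne] at hy
      rcases (PySem.Set.mem_add acc (pvTuple x) y).mp hy with h | h
      · exact Or.inl h
      · exact Or.inr (h ▸ ⟨pv_tuple_nodup' x, pv_tuple_ne_nil x⟩)
    · rw [if_neg hne] at hy
      exact Or.inl hy
  · rw [if_neg hin] at hy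
    exact Or.inl hy

theorem pv_len_one_iff (X : List (List String)) :
    ((PySem.Set.len X == 1) = true) ↔ X.length = 1 := by
  simp [PySem.Set.len]

theorem pv_sub_iff (N : List (List String)) (t : List String) :
    pvSub N t = true ↔ ∃ s ∈ N, s ≠ t ∧ ∀ c ∈ t, c ∈ s := by
  unfold pvSub
  rw [List.any_eq_true]
  constructor
  · rintro ⟨s, hsN, hb⟩
    rw [Bool.and_eq_true] at hb
    refine ⟨s, hsN, fun he => (bne_iff_ne.mp hb.1) he.symm, fun c hc => ?_⟩
    have h2 := hb.2
    simp only [PySem.Set.issubset, List.all_eq_true] at h2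
    have h3 := h2 c ((PySem.Set.mem_ofList t c).mpr hc)
    exact (PySem.Set.mem_ofList s c).mp ((PySem.Set.contains_iff _ _).mp h3)
  · rintro ⟨s, hsN, hne, hss⟩
    refine ⟨s, hsN, ?_⟩
    rw [Bool.and_eq_true]
    refine ⟨bne_iff_ne.mpr (fun he => hne he.symm), ?_⟩
    simp only [PySem.Set.issubset, List.all_eq_true]
    intro x hx
    exact (PySem.Set.contains_iff _ _).mpr
      ((PySem.Set.mem_ofList s x).mpr (hss x ((PySem.Set.mem_ofList t x).mp hx)))

theorem pv_supers_eq (N : List (List String)) (hNod : N.Nodup)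
    (hels : ∀ t ∈ N, t.Nodup ∧ t ≠ []) (a : String) (l : List String) :
    pvSupers N (a :: l) = N.filter (fun s => (a :: l).all (fun c => s.contains c)) := by
  have hpost : ∀ c, (pvIndex N).getD c [] = N.filter (fun u => u.contains c) := by
    intro c
    unfold pvIndex
    rw [pv_index_getD c N (fun u hu => (hels u hu).1), PySem.Dict.getD_empty]
    simp
  have h0 : (PySem.List.pyGet? (a :: l) 0).getD "" = a := by
    simp [PySem.List.pyGet?, PySem.List.pyIdx?]
  unfold pvSupers
  rw [h0, pv_inter_fold (a :: l) (fun c => (pvIndex N).getD c [])]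
  simp only [hpost]
  rw [PySem.Set.ofList_eq_self_of_nodup _ (hNod.filter _)]
  rw [List.filter_filter]
  apply List.filter_congr
  intro s hs
  have hcs : ∀ c, (N.filter (fun u => u.contains c)).contains s = s.contains c := by
    intro c
    rw [Bool.eq_iff_iff, List.contains_iff_mem, List.mem_filter]
    constructor
    · intro h
      have := h.2
      simpa using this
    · intro h
      refine ⟨hs, by simpa using h⟩
  simp only [hcs, List.all_cons]
  cases hca : s.contains a <;> simp

theorem pv_final_eq (N : List (List String)) (hNod : N.Nodup)
    (hels : ∀ t ∈ N, t.Nodup ∧ t ≠ []) : pvFinalA N = pvFinalB N := by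
  unfold pvFinalA pvFinalB
  have hA : (fun (acc : PySem.Set (List String)) (t : List String) =>
      if pvSub N t then acc else PySem.Set.add acc t)
      = (fun (acc : PySem.Set (List String)) (t : List String) =>
      if (!pvSub N t) then PySem.Set.add acc t else acc) := by
    funext acc t
    by_cases h : pvSub N t = true <;> simp [h]
  rw [hA]
  rw [pv_foldl_add_filter N (fun t => !pvSub N t) PySem.Set.empty (fun x _ => rfl) hNod]
  rw [pv_foldl_add_filter N (fun t => PySem.Set.len (pvSupers N t) == 1) PySem.Set.empty
    (fun x _ => rfl) hNod]
  simp only [PySem.Set.empty, List.nil_append]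
  apply List.filter_congr
  intro t ht
  obtain ⟨tnd, tne⟩ := hels t ht
  obtain ⟨a, l, rfl⟩ := List.exists_cons_of_ne_nil tne
  rw [pv_supers_eq N hNod hels a l]
  have hq : ((a :: l).all (fun c => (a :: l).contains c)) = true := by
    rw [List.all_eq_true]
    intro c hc
    simpa using hc
  rw [Bool.eq_iff_iff, pv_len_one_iff,
    pv_filter_length_one N hNod (a :: l) ht _ hq]
  constructor
  · intro hnot s hsN hqs
    by_contra hne
    have hsubt : pvSub N (a :: l) = true := (pv_sub_iff N (a :: l)).mpr
      ⟨s, hsN, hne, fun c hc => by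
        rw [List.all_eq_true] at hqs
        have h5 := hqs c hc
        simpa using h5⟩
    rw [hsubt] at hnot
    simp at hnot
  · intro hforall
    have hfalse : pvSub N (a :: l) = false := by
      rw [Bool.eq_false_iff]
      intro hsubt
      obtain ⟨s, hsN, hne, hss⟩ := (pv_sub_iff N (a :: l)).mp hsubt
      exact hne (hforall s hsN (by
        rw [List.all_eq_true]
        intro c hc
        simpa using hss c hc))
    rw [hfalse]
    rfl

theorem post_rules_process_spec_aux : ∀ rules_str, post_rules_process rules_str = post_rules_process_alt rules_str := by
  intro rs
  show (if (rs == "") = true then ([] : List (List String))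
        else pvFinalA (pvParse (PySem.Str.splitlines (PySem.Str.strip rs))))
     = (if (rs == "") = true then ([] : List (List String))
        else pvFinalB (pvParseB (PySem.Str.splitlines (PySem.Str.strip rs))))
  by_cases h0 : (rs == "") = true
  · rw [if_pos h0, if_pos h0]
  · rw [if_neg h0, if_neg h0, ← pv_parse_eq]
    exact pv_final_eq _ (pv_parse_nodup _) (pv_parse_mem _)

-- ===== VERDICT (by name: the statement is the Claim_ definition above) =====
theorem post_rules_process_spec : Claim_equal_post_rules_process := by
  intro rules_str _
  unfold Spec_post_rules_process
  exact post_rules_process_spec_aux rules_str
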